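-- pv_equiv track=rewrite | github.com/KainAber/lopper | lopper/app.py | collapsed_roots
-- ===== SOURCE A (Python) =====
-- def collapsed_roots(collapsed_nodes: set[int], parent_map: dict[int, int]) -> list[int]:
--     roots = []
--     for node_id in collapsed_nodes:
--         current = parent_map.get(node_id)
--         while current is not None:
--             if current in collapsed_nodes:
--                 break
--             current = parent_map.get(current)
--         else:
--             roots.append(node_id)
--     return roots
-- ===== SOURCE B (Python) =====
-- def collapsed_roots(collapsed_nodes: set[int], parent_map: dict[int, int]) -> list[int]:
--     # Memoized: memo[x] = True iff x or some ancestor of x is collapsed.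
--     memo = {}
--
--     def covered(x: int) -> bool:
--         path = []
--         cur = x
--         while True:
--             if cur in memo:
--                 res = memo[cur]
--                 break
--             if cur in collapsed_nodes:
--                 res = True
--                 break
--             path.append(cur)
--             cur = parent_map.get(cur)
--             if cur is None:
--                 res = False
--                 break
--         for p in path:
--             memo[p] = res
--         return res
--
--     roots = []
--     for node_id in collapsed_nodes:
--         parent = parent_map.get(node_id)
--         if parent is None or not covered(parent):
--             roots.append(node_id)
--     return roots
-- ===== Notes on version B (the rewrite author's own statement) =====
-- stated objective: alternative
-- what changed: B replaces A's independent ancestor walk for every collapsed node by a single memoized walk: each walk records, for every node on its path, whether the chain reaches a collapsed node, so later walks stop at the first already-resolved node.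
-- outside the precondition, e.g. on collapsed_roots({5}, {1: 2, 2: 1}): A returns [5], B returns [5]
import Mathlib
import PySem

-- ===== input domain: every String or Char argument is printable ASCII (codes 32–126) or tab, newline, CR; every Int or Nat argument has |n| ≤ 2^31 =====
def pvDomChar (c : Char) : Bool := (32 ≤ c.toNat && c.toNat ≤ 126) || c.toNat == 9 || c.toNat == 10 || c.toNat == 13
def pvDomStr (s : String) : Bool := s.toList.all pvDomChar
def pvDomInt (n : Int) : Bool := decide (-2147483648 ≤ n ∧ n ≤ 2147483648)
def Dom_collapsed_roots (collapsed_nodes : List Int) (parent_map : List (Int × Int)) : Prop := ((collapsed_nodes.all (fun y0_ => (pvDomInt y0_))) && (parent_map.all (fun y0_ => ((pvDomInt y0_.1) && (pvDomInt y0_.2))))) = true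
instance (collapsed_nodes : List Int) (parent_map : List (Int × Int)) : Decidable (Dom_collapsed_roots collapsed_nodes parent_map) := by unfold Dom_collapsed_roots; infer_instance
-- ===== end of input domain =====

-- B replaces A's independent ancestor walk per node by a single memoized walk: results are
-- cached along each path, so later walks stop at the first already-resolved node.

-- ===== PORT A =====
-- A's `while current is not None: …` walk; fuel = parent_map.length + 2 never runs out under Pre_
-- (every parent chain falls off the map within parent_map.length + 1 steps).
def chaseA (cs : List Int) (pm : PySem.Dict Int Int) : Nat → Option Int → Bool
  | _, none => true
  | 0, some _ => false
  | f+1, some c => if cs.contains c then false else chaseA cs pm f (pm.get? c)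

def collapsed_roots (collapsed_nodes : List Int) (parent_map : List (Int × Int)) : List Int :=
  let pm := PySem.Dict.ofList parent_map
  collapsed_nodes.foldl
    (fun roots node_id =>
      if chaseA collapsed_nodes pm (parent_map.length + 2) (pm.get? node_id)
      then roots ++ [node_id] else roots)
    []

-- ===== PORT B =====
-- B's inner `while True` loop of `covered`: walks up collecting `path` until memo hit,
-- collapsed node, or missing parent; same fuel bound as A's walk.
def coveredLoop (cs : List Int) (pm : PySem.Dict Int Int) :
    Nat → PySem.Dict Int Bool → List Int → Int → Bool × List Int
  | 0, _, path, _ => (false, path)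
  | f+1, memo, path, cur =>
    match memo.get? cur with
    | some res => (res, path)
    | none =>
      if cs.contains cur then (true, path)
      else
        match pm.get? cur with
        | none => (false, path ++ [cur])
        | some nxt => coveredLoop cs pm f memo (path ++ [cur]) nxt

-- B's `covered(x)`: run the loop, then write the shared result back for every node on the path.
def coveredB (cs : List Int) (pm : PySem.Dict Int Int) (fuel : Nat)
    (memo : PySem.Dict Int Bool) (x : Int) : Bool × PySem.Dict Int Bool :=
  let r := coveredLoop cs pm fuel memo [] x
  (r.1, r.2.foldl (fun m p => m.insert p r.1) memo)

def collapsed_roots_alt (collapsed_nodes : List Int) (parent_map : List (Int × Int)) : List Int :=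
  let pm := PySem.Dict.ofList parent_map
  (collapsed_nodes.foldl
    (fun (st : List Int × PySem.Dict Int Bool) node_id =>
      match pm.get? node_id with
      | none => (st.1 ++ [node_id], st.2)
      | some parent =>
        let r := coveredB collapsed_nodes pm (parent_map.length + 2) st.2 parent
        (if r.1 then st.1 else st.1 ++ [node_id], r.2))
    ([], PySem.Dict.empty)).1

-- ===== PRECONDITION & SPEC =====
-- pvIter pm f x follows the parent chain from x for f steps; none = the chain left the map.
def pvIter (pm : PySem.Dict Int Int) : Nat → Int → Option Int
  | 0, x => some x
  | f+1, x => match pm.get? x with | none => none | some p => pvIter pm f p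

-- Pre_ excludes parent maps containing a cycle: A (and B) diverge when a collapsed node's
-- ancestor chain runs into a cycle without meeting a collapsed node; cyclic maps whose cycles
-- are never reached that way are also excluded (A still returns there — see the claim's cites).
def Pre_collapsed_roots (collapsed_nodes : List Int) (parent_map : List (Int × Int)) : Prop :=
  ∀ p ∈ parent_map, pvIter (PySem.Dict.ofList parent_map) (parent_map.length + 1) p.1 = none
instance (collapsed_nodes : List Int) (parent_map : List (Int × Int)) : Decidable (Pre_collapsed_roots collapsed_nodes parent_map) := by unfold Pre_collapsed_roots; infer_instance

def pvWitness_collapsed_roots : List Int × (List (Int × Int)) := ([1, 3], [(3, 1), (1, 2)])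

def Spec_collapsed_roots (collapsed_nodes : List Int) (parent_map : List (Int × Int)) (out : List Int) : Prop := out = collapsed_roots_alt collapsed_nodes parent_map
instance (collapsed_nodes : List Int) (parent_map : List (Int × Int)) (out : List Int) : Decidable (Spec_collapsed_roots collapsed_nodes parent_map out) := by unfold Spec_collapsed_roots; infer_instance

-- ===== CLAIM (what is proved, stated in full; the proofs are below) =====
def Claim_equal_collapsed_roots : Prop := ∀ (collapsed_nodes : List Int) (parent_map : List (Int × Int)), Dom_collapsed_roots collapsed_nodes parent_map → Pre_collapsed_roots collapsed_nodes parent_map → Spec_collapsed_roots collapsed_nodes parent_map (collapsed_roots collapsed_nodes parent_map)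

-- ===== LEMMAS AND PROOFS =====

theorem chaseA_none (cs : List Int) (pm : PySem.Dict Int Int) (f : Nat) :
    chaseA cs pm f none = true := by cases f <;> rfl

theorem chaseA_some (cs : List Int) (pm : PySem.Dict Int Int) (f : Nat) (c : Int) :
    chaseA cs pm (f+1) (some c) = if cs.contains c then false else chaseA cs pm f (pm.get? c) := rfl

theorem pvIter_none_succ (pm : PySem.Dict Int Int) :
    ∀ f x, pvIter pm f x = none → pvIter pm (f+1) x = none := by
  intro f
  induction f with
  | zero => intro x h; simp [pvIter] at h
  | succ f ih =>
    intro x h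
    simp only [pvIter] at h ⊢
    cases hg : pm.get? x with
    | none => rfl
    | some p => rw [hg] at h; exact ih p h

theorem pvIter_none_mono (pm : PySem.Dict Int Int) {f g : Nat} (hfg : f ≤ g) :
    ∀ x, pvIter pm f x = none → pvIter pm g x = none := by
  induction g with
  | zero =>
    intro x h
    have : f = 0 := by omega
    subst this; exact h
  | succ g ih =>
    intro x h
    rcases Nat.lt_or_ge f (g+1) with hlt | hge
    · exact pvIter_none_succ pm g x (ih (by omega) x h)
    · have : f = g + 1 := by omega
      subst this; exact h

theorem mem_items_foldl_insert (l : List (Int × Int)) :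
    ∀ (d : PySem.Dict Int Int) p,
      p ∈ (l.foldl (fun d q => d.insert q.1 q.2) d).items → p ∈ d.items ∨ p.1 ∈ l.map (·.1) := by
  induction l with
  | nil => intro d p h; exact Or.inl h
  | cons q l ih =>
    intro d p h
    simp only [List.foldl_cons] at h
    rcases ih (d.insert q.1 q.2) p h with h' | h'
    · rw [PySem.Dict.mem_items_insert] at h'
      rcases h' with h' | h'
      · right; simp [h']
      · exact Or.inl h'.1
    · right; simp only [List.map_cons, List.mem_cons]; tauto

theorem get?_ofList_key (l : List (Int × Int)) (x v : Int)
    (h : (PySem.Dict.ofList l).get? x = some v) : x ∈ l.map (·.1) := by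
  have hm := PySem.Dict.mem_items_of_get?_eq_some _ h
  have heq : PySem.Dict.ofList l = l.foldl (fun d q => d.insert q.1 q.2) PySem.Dict.empty := rfl
  rw [heq] at hm
  rcases mem_items_foldl_insert l PySem.Dict.empty (x, v) hm with h' | h'
  · simp [PySem.Dict.empty, PySem.Dict.items] at h'
  · exact h'

-- Under Pre_, EVERY chain falls off the map within parent_map.length + 1 steps.
theorem allNone (parent_map : List (Int × Int))
    (hpre : ∀ p ∈ parent_map, pvIter (PySem.Dict.ofList parent_map) (parent_map.length + 1) p.1 = none) :
    ∀ x, pvIter (PySem.Dict.ofList parent_map) (parent_map.length + 1) x = none := by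
  intro x
  cases hg : (PySem.Dict.ofList parent_map).get? x with
  | none =>
    apply pvIter_none_mono _ (show 1 ≤ parent_map.length + 1 by omega)
    simp [pvIter, hg]
  | some v =>
    have hx := get?_ofList_key parent_map x v hg
    rcases List.mem_map.1 hx with ⟨p, hp, hpx⟩
    have := hpre p hp
    rwa [hpx] at this

theorem chase_stable (cs : List Int) (pm : PySem.Dict Int Int) :
    ∀ f x, pvIter pm f x = none → ∀ g, f ≤ g → chaseA cs pm g (some x) = chaseA cs pm f (some x) := by
  intro f
  induction f with
  | zero => intro x h; simp [pvIter] at h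
  | succ f ih =>
    intro x h g hg
    obtain ⟨g', rfl⟩ : ∃ g', g = g' + 1 := ⟨g - 1, by omega⟩
    rw [chaseA_some, chaseA_some]
    by_cases hc : cs.contains x
    · have hx : x ∈ cs := by simpa using hc
      simp [hx]
    · simp only [hc, if_false]
      simp only [pvIter] at h
      cases hget : pm.get? x with
      | none => simp [chaseA_none]
      | some p =>
        rw [hget] at h
        rw [ih p h g' (by omega), ih p h f (le_refl f)]

-- cleanSpec x: A's walk starting at x finds no collapsed node before falling off the map.
def cleanSpec (cs : List Int) (parent_map : List (Int × Int)) (x : Int) : Bool :=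
  chaseA cs (PySem.Dict.ofList parent_map) (parent_map.length + 2) (some x)

theorem cleanSpec_rec (cs : List Int) (parent_map : List (Int × Int))
    (hA : ∀ x, pvIter (PySem.Dict.ofList parent_map) (parent_map.length + 1) x = none) (x : Int) :
    cleanSpec cs parent_map x =
      if cs.contains x then false
      else match (PySem.Dict.ofList parent_map).get? x with
           | none => true
           | some p => cleanSpec cs parent_map p := by
  unfold cleanSpec
  rw [show parent_map.length + 2 = (parent_map.length + 1) + 1 from rfl, chaseA_some]
  by_cases hc : cs.contains x
  · have hx : x ∈ cs := by simpa using hc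
    simp [hx]
  · simp only [hc, if_false]
    cases hget : (PySem.Dict.ofList parent_map).get? x with
    | none => simp [chaseA_none]
    | some p =>
      exact (chase_stable cs _ (parent_map.length + 1) p (hA p) (parent_map.length + 2) (by omega)).symm

def MemoInv (cs : List Int) (parent_map : List (Int × Int)) (memo : PySem.Dict Int Bool) : Prop :=
  ∀ k res, memo.get? k = some res → res = !cleanSpec cs parent_map k

theorem coveredLoop_spec (cs : List Int) (parent_map : List (Int × Int))
    (hA : ∀ x, pvIter (PySem.Dict.ofList parent_map) (parent_map.length + 1) x = none) :
    ∀ f x memo path, pvIter (PySem.Dict.ofList parent_map) f x = none →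
      MemoInv cs parent_map memo →
      ∃ ext, coveredLoop cs (PySem.Dict.ofList parent_map) f memo path x
              = (!cleanSpec cs parent_map x, path ++ ext)
        ∧ ∀ p ∈ ext, cleanSpec cs parent_map p = cleanSpec cs parent_map x := by
  intro f
  induction f with
  | zero => intro x memo path h; simp [pvIter] at h
  | succ f ih =>
    intro x memo path h hinv
    cases hm : memo.get? x with
    | some res =>
      refine ⟨[], ?_, by simp⟩
      rw [← hinv x res hm]
      simp [coveredLoop, hm]
    | none =>
      by_cases hx : x ∈ cs
      · have hc : cs.contains x = true := by simpa using hx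
        refine ⟨[], ?_, by simp⟩
        have h1 : cleanSpec cs parent_map x = false := by
          rw [cleanSpec_rec cs parent_map hA x, if_pos hc]
        simp [coveredLoop, hm, hc, h1, hx]
      · have hc : cs.contains x = false := by simpa using hx
        simp only [pvIter] at h
        cases hget : (PySem.Dict.ofList parent_map).get? x with
        | none =>
          refine ⟨[x], ?_, ?_⟩
          · have h1 : cleanSpec cs parent_map x = true := by
              rw [cleanSpec_rec cs parent_map hA x, if_neg (by simp [hx]), hget]
            simp [coveredLoop, hm, hc, hget, h1, hx]
          · intro p hp; simp only [List.mem_singleton] at hp; subst hp; rfl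
        | some nxt =>
          rw [hget] at h
          obtain ⟨ext', heq, hext⟩ := ih nxt memo (path ++ [x]) h hinv
          have hxn : cleanSpec cs parent_map x = cleanSpec cs parent_map nxt := by
            rw [cleanSpec_rec cs parent_map hA x, if_neg (by simp [hx]), hget]
          refine ⟨x :: ext', ?_, ?_⟩
          · simp [coveredLoop, hm, hc, hget, heq, hxn, hx]
          · intro p hp
            rcases List.mem_cons.1 hp with hp | hp
            · subst hp; rfl
            · rw [hext p hp, hxn]

theorem MemoInv_update (cs : List Int) (parent_map : List (Int × Int)) (res : Bool) :
    ∀ (ext : List Int) (memo : PySem.Dict Int Bool), MemoInv cs parent_map memo →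
      (∀ p ∈ ext, res = !cleanSpec cs parent_map p) →
      MemoInv cs parent_map (ext.foldl (fun m p => m.insert p res) memo) := by
  intro ext
  induction ext with
  | nil => intro memo hinv _; exact hinv
  | cons q ext ih =>
    intro memo hinv hres
    simp only [List.foldl_cons]
    apply ih
    · intro k r hk
      rw [PySem.Dict.get?_insert] at hk
      by_cases hkq : k = q
      · rw [if_pos hkq] at hk
        cases hk
        rw [hkq]; exact hres q (by simp)
      · rw [if_neg hkq] at hk
        exact hinv k r hk
    · intro p hp; exact hres p (by simp [hp])

theorem fold_eq (cs : List Int) (parent_map : List (Int × Int))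
    (hA : ∀ x, pvIter (PySem.Dict.ofList parent_map) (parent_map.length + 1) x = none) :
    ∀ (l : List Int) (acc : List Int) (memo : PySem.Dict Int Bool), MemoInv cs parent_map memo →
      l.foldl
        (fun roots node_id =>
          if chaseA cs (PySem.Dict.ofList parent_map) (parent_map.length + 2)
               ((PySem.Dict.ofList parent_map).get? node_id)
          then roots ++ [node_id] else roots) acc
      = (l.foldl
          (fun (st : List Int × PySem.Dict Int Bool) node_id =>
            match (PySem.Dict.ofList parent_map).get? node_id with
            | none => (st.1 ++ [node_id], st.2)
            | some parent =>
              let r := coveredB cs (PySem.Dict.ofList parent_map) (parent_map.length + 2) st.2 parent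
              (if r.1 then st.1 else st.1 ++ [node_id], r.2)) (acc, memo)).1 := by
  intro l
  induction l with
  | nil => intro acc memo _; rfl
  | cons n l ih =>
    intro acc memo hinv
    simp only [List.foldl_cons]
    cases hget : (PySem.Dict.ofList parent_map).get? n with
    | none =>
      rw [chaseA_none, if_pos rfl]
      exact ih (acc ++ [n]) memo hinv
    | some parent =>
      have hiter : pvIter (PySem.Dict.ofList parent_map) (parent_map.length + 2) parent = none :=
        pvIter_none_mono _ (by omega) parent (hA parent)
      obtain ⟨ext, heq, hext⟩ := coveredLoop_spec cs parent_map hA (parent_map.length + 2) parent memo [] hiter hinv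
      have hcov : coveredB cs (PySem.Dict.ofList parent_map) (parent_map.length + 2) memo parent
          = (!cleanSpec cs parent_map parent,
             ext.foldl (fun m p => m.insert p (!cleanSpec cs parent_map parent)) memo) := by
        unfold coveredB
        rw [heq]
        simp
      have hinv' : MemoInv cs parent_map (ext.foldl (fun m p => m.insert p (!cleanSpec cs parent_map parent)) memo) :=
        MemoInv_update cs parent_map _ ext memo hinv (fun p hp => by rw [hext p hp])
      have hchase : chaseA cs (PySem.Dict.ofList parent_map) (parent_map.length + 2) (some parent)
          = cleanSpec cs parent_map parent := rfl
      rw [hchase]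
      simp only [hcov]
      cases hcl : cleanSpec cs parent_map parent with
      | false =>
        rw [hcl] at hinv'
        simpa [hcl] using ih acc _ hinv'
      | true =>
        rw [hcl] at hinv'
        simpa [hcl] using ih (acc ++ [n]) _ hinv'

-- ===== VERDICT (by name: the statement is the Claim_ definition above) =====
theorem collapsed_roots_spec : Claim_equal_collapsed_roots := by
  intro cs pmL _ hpre
  unfold Spec_collapsed_roots collapsed_roots collapsed_roots_alt
  have hA := allNone pmL hpre
  exact fold_eq cs pmL hA cs [] PySem.Dict.empty (fun k res h => by simp [PySem.Dict.get?_empty] at h)
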